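-- pv_equiv track=rewrite | github.com/bineficial/meta-interview | onsite/archive/total_active.py | total_active
-- ===== SOURCE A (Python) =====
-- def get_active_on_date(data, date_i):
--     total = 0
--     for row in data:
--         total += row[date_i]
--     return total
--
-- def total_active(datelist, metrics):
--     data = {}
--     for metric, source in metrics.items():
--         data[metric] = [datelist[s] for s in source]
--
--     output = {}
--     for metric, data_set in data.items():
--         for i in range(len(data_set[0])):
--             active_count = get_active_on_date(data_set, i)
--
--             if active_count >= 1:
--                 output[metric] = output.get(metric, 0) + 1
--
--     return output
-- ===== SOURCE B (Python) =====
-- def total_active(datelist, metrics):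
--     output = {}
--     for metric, source in metrics.items():
--         data_set = [datelist[s] for s in source]
--         n = len(data_set[0])
--         sums = [0] * n
--         for row in data_set:
--             sums = [sums[i] + row[i] for i in range(n)]
--         count = sum(1 for v in sums if v >= 1)
--         if count >= 1:
--             output[metric] = count
--     return output
-- ===== Notes on version B (the rewrite author's own statement) =====
-- stated objective: alternative
-- what changed: B replaces A's helper-based column-by-column re-scan (get_active_on_date called once per date, each rescanning all rows) and A's incremental output.get counter with a single row-major pass that maintains a per-date partial-sum list, then counts the positive entries once and inserts the metric's count with one dict write only when it is positive.
import Mathlib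
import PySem

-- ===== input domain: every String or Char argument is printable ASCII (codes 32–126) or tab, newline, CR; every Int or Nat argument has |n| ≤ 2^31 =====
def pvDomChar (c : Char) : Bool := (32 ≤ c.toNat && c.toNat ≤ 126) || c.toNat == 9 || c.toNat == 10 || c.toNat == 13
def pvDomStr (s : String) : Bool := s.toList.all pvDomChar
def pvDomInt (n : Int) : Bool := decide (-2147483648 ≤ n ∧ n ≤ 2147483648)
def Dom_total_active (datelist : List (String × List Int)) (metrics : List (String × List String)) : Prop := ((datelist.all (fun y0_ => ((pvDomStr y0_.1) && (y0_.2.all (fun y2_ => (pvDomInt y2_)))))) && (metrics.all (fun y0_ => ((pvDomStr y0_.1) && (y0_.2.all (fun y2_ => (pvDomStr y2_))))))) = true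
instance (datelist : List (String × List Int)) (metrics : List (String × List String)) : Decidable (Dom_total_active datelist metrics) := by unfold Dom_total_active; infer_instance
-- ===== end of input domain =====

-- B maintains one per-date partial-sum list in a single row-major pass per metric (A rescans the
-- rows once per date via a helper and counts through an incremental dict update); return values agree everywhere.

-- ===== PORT A =====
def get_active_on_date (data : List (List Int)) (date_i : Int) : Int :=
  data.foldl (fun total row => total + PySem.List.pyGetD row date_i 0) 0

def total_active (datelist : List (String × List Int)) (metrics : List (String × List String)) : List (String × Int) :=
  let dl := PySem.Dict.ofList datelist
  let data : PySem.Dict String (List (List Int)) :=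
    (PySem.Dict.ofList metrics).items.foldl
      (fun d p => d.insert p.1 (p.2.map (fun s => dl.getD s []))) PySem.Dict.empty
  let output : PySem.Dict String Int :=
    data.items.foldl
      (fun out p =>
        (PySem.List.pyRange 0 ((PySem.List.pyGetD p.2 0 []).length : Int) 1).foldl
          (fun out i =>
            let active_count := get_active_on_date p.2 i
            if active_count ≥ 1 then out.insert p.1 (out.getD p.1 0 + 1) else out) out)
      PySem.Dict.empty
  output.items

-- ===== PORT B =====
def total_active_alt (datelist : List (String × List Int)) (metrics : List (String × List String)) : List (String × Int) :=
  let dl := PySem.Dict.ofList datelist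
  let output : PySem.Dict String Int :=
    (PySem.Dict.ofList metrics).items.foldl
      (fun out p =>
        let data_set := p.2.map (fun s => dl.getD s [])
        let n : Int := ((PySem.List.pyGetD data_set 0 []).length : Int)
        let sums0 : List Int := List.replicate n.toNat 0
        let sums := data_set.foldl
          (fun sums row => (PySem.List.pyRange 0 n 1).map
            (fun i => PySem.List.pyGetD sums i 0 + PySem.List.pyGetD row i 0)) sums0
        let count : Int := sums.foldl (fun c v => if v ≥ 1 then c + 1 else c) 0
        if count ≥ 1 then out.insert p.1 count else out)
      PySem.Dict.empty
  output.items

-- ===== PRECONDITION & SPEC =====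
-- Pre_ excludes exactly the inputs where the Python A raises: a metric whose source list names a
-- key missing from datelist (KeyError), an empty source list (IndexError on data_set[0]), or a
-- source row shorter than the metric's first row (IndexError on row[date_i]).
def Pre_total_active (datelist : List (String × List Int)) (metrics : List (String × List String)) : Prop :=
  ∀ p ∈ (PySem.Dict.ofList metrics).items,
    (∀ s ∈ p.2, (PySem.Dict.ofList datelist).contains s = true) ∧
    p.2 ≠ [] ∧
    (∀ s ∈ p.2,
      ((PySem.Dict.ofList datelist).getD (p.2.headD "") []).length ≤
        ((PySem.Dict.ofList datelist).getD s []).length)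
instance (datelist : List (String × List Int)) (metrics : List (String × List String)) : Decidable (Pre_total_active datelist metrics) := by unfold Pre_total_active; infer_instance

def pvWitness_total_active : (List (String × List Int)) × (List (String × List String)) :=
  ([("a", [1, 0]), ("b", [0, 2])], [("m", ["a", "b"]), ("k", ["b"])])

def Spec_total_active (datelist : List (String × List Int)) (metrics : List (String × List String)) (out : List (String × Int)) : Prop := out = total_active_alt datelist metrics
instance (datelist : List (String × List Int)) (metrics : List (String × List String)) (out : List (String × Int)) : Decidable (Spec_total_active datelist metrics out) := by unfold Spec_total_active; infer_instance

-- ===== CLAIM (what is proved, stated in full; the proofs are below) =====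
def Claim_equal_total_active : Prop := ∀ (datelist : List (String × List Int)) (metrics : List (String × List String)), Dom_total_active datelist metrics → Pre_total_active datelist metrics → Spec_total_active datelist metrics (total_active datelist metrics)

-- ===== LEMMAS AND PROOFS =====

-- A's inner date loop over a fixed metric m is one conditional insert of the count.
theorem foldA_count (L : List Int) (pp : Int → Prop) [DecidablePred pp] (m : String) (out : PySem.Dict String Int) :
    L.foldl (fun o i => if pp i then o.insert m (o.getD m 0 + 1) else o) out
      = if L.countP (fun i => decide (pp i)) = 0 then out
        else out.insert m (out.getD m 0 + (L.countP (fun i => decide (pp i)) : Int)) := by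
  induction L generalizing out with
  | nil => simp
  | cons i L ih =>
    by_cases h : pp i
    · simp only [List.foldl_cons, h, if_true, ih, List.countP_cons, decide_true, if_true]
      split_ifs with h0 h1 <;>
        first
          | contradiction
          | omega
          | (congr 1; push_cast; omega)
          | (rw [PySem.Dict.getD_insert_self, PySem.Dict.insert_insert_self]
             congr 1; push_cast; ring)
    · simp [List.foldl_cons, h, ih]

-- B's row-major accumulation computes, per date, the same column sum as A's helper.
theorem sums_spec (n : Int) (rows : List (List Int)) (f : Int → Int) :
    rows.foldl
        (fun sums row => (PySem.List.pyRange 0 n 1).map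
          (fun i => PySem.List.pyGetD sums i 0 + PySem.List.pyGetD row i 0))
        ((PySem.List.pyRange 0 n 1).map f)
      = (PySem.List.pyRange 0 n 1).map
          (fun i => rows.foldl (fun t row => t + PySem.List.pyGetD row i 0) (f i)) := by
  induction rows generalizing f with
  | nil => rfl
  | cons row rows ih =>
    simp only [List.foldl_cons]
    have hmap : (PySem.List.pyRange 0 n 1).map
        (fun i => PySem.List.pyGetD ((PySem.List.pyRange 0 n 1).map f) i 0 + PySem.List.pyGetD row i 0)
        = (PySem.List.pyRange 0 n 1).map (fun i => f i + PySem.List.pyGetD row i 0) := by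
      apply List.map_congr_left
      intro i hi
      rw [PySem.List.mem_pyRange_one] at hi
      rw [PySem.List.pyGetD_map_pyRange_of_nonneg f n i 0 hi.1 hi.2]
    rw [hmap, ih (fun i => f i + PySem.List.pyGetD row i 0)]

theorem count_foldl (sums : List Int) (c : Int) :
    sums.foldl (fun c v => if v ≥ 1 then c + 1 else c) c
      = c + (sums.countP (fun v => v ≥ 1) : Int) := by
  induction sums generalizing c with
  | nil => simp
  | cons v sums ih =>
    by_cases h : v ≥ 1
    · simp only [List.foldl_cons, h, if_true, ih, List.countP_cons]
      simp; ring
    · simp [List.foldl_cons, h, ih]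

-- one metric step: A's date loop = B's count-then-insert, for a fresh key m
theorem step_eq (data_set : List (List Int)) (m : String) (n : Nat)
    (out : PySem.Dict String Int) (hm : out.contains m = false) :
    (PySem.List.pyRange 0 (n : Int) 1).foldl
        (fun out i =>
          let active_count := get_active_on_date data_set i
          if active_count ≥ 1 then out.insert m (out.getD m 0 + 1) else out) out
      =
    (let sums0 : List Int := List.replicate ((n : Int)).toNat 0
     let sums := data_set.foldl
        (fun sums row => (PySem.List.pyRange 0 (n : Int) 1).map
          (fun i => PySem.List.pyGetD sums i 0 + PySem.List.pyGetD row i 0)) sums0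
     let count : Int := sums.foldl (fun c v => if v ≥ 1 then c + 1 else c) 0
     if count ≥ 1 then out.insert m count else out) := by
  have hrep : List.replicate ((n : Int)).toNat 0
      = (PySem.List.pyRange 0 (n : Int) 1).map (fun _ => (0 : Int)) := by
    rw [List.map_const', PySem.List.length_pyRange_one]
    norm_num
  simp only [hrep]
  rw [sums_spec (n : Int) data_set (fun _ => 0)]
  rw [count_foldl]
  rw [List.countP_map]
  rw [foldA_count _ (fun i => get_active_on_date data_set i ≥ 1) m out]
  have hgd : out.getD m 0 = 0 := PySem.Dict.getD_of_not_contains _ _ hm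
  have hfun : ((fun v => decide (v ≥ 1)) ∘ fun i =>
      data_set.foldl (fun t row => t + PySem.List.pyGetD row i 0) ((fun _ => (0:Int)) i))
      = (fun i => decide (get_active_on_date data_set i ≥ 1)) := by
    funext i; rfl
  rw [hfun]
  set c := (PySem.List.pyRange 0 (n : Int) 1).countP
      (fun i => decide (get_active_on_date data_set i ≥ 1)) with hc
  by_cases h0 : c = 0
  · simp [h0]
  · have h1 : (1 : Int) ≤ (c : Int) := by omega
    simp only [h0, if_false, hgd, zero_add]
    rw [if_pos (by exact_mod_cast h1)]

-- outer loop: both folds over the metric items agree while all remaining keys are fresh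
theorem outer_eq (dl : PySem.Dict String (List Int)) (M : List (String × List String))
    (out : PySem.Dict String Int) (hfresh : ∀ q ∈ M, out.contains q.1 = false)
    (hnd : (M.map Prod.fst).Nodup) :
    (M.map (fun p => (p.1, p.2.map (fun s => dl.getD s [])))).foldl
      (fun out p =>
        (PySem.List.pyRange 0 ((PySem.List.pyGetD p.2 0 []).length : Int) 1).foldl
          (fun out i =>
            let active_count := get_active_on_date p.2 i
            if active_count ≥ 1 then out.insert p.1 (out.getD p.1 0 + 1) else out) out) out
      =
    M.foldl
      (fun out p =>
        let data_set := p.2.map (fun s => dl.getD s [])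
        let n : Int := ((PySem.List.pyGetD data_set 0 []).length : Int)
        let sums0 : List Int := List.replicate n.toNat 0
        let sums := data_set.foldl
          (fun sums row => (PySem.List.pyRange 0 n 1).map
            (fun i => PySem.List.pyGetD sums i 0 + PySem.List.pyGetD row i 0)) sums0
        let count : Int := sums.foldl (fun c v => if v ≥ 1 then c + 1 else c) 0
        if count ≥ 1 then out.insert p.1 count else out) out := by
  induction M generalizing out with
  | nil => rfl
  | cons p M ih =>
    simp only [List.map_cons, List.foldl_cons]
    rw [step_eq (p.2.map (fun s => dl.getD s [])) p.1 ((PySem.List.pyGetD (p.2.map (fun s => dl.getD s [])) 0 []).length) out (hfresh p (List.mem_cons_self))]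
    apply ih
    · intro q hq
      simp only [List.map_cons, List.nodup_cons] at hnd
      have hne : q.1 ≠ p.1 := by
        intro h; exact hnd.1 (h ▸ List.mem_map_of_mem hq)
      dsimp only
      split_ifs
      · rw [PySem.Dict.contains_insert]
        simp [hne, hfresh q (List.mem_cons_of_mem _ hq)]
      · exact hfresh q (List.mem_cons_of_mem _ hq)
    · simp only [List.map_cons, List.nodup_cons] at hnd
      exact hnd.2

-- ===== VERDICT (by name: the statement is the Claim_ definition above) =====
theorem total_active_spec : Claim_equal_total_active := by
  intro datelist metrics _ _
  unfold Spec_total_active total_active total_active_alt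
  set dl := PySem.Dict.ofList datelist with hdl
  set M := (PySem.Dict.ofList metrics).items with hM
  have hnd : (M.map Prod.fst).Nodup := PySem.Dict.nodup_keys_ofList metrics
  have hdata : (M.foldl (fun d p => d.insert p.1 (p.2.map (fun s => dl.getD s [])))
      PySem.Dict.empty).items = M.map (fun p => (p.1, p.2.map (fun s => dl.getD s []))) := by
    have := PySem.Dict.items_foldl_insert_fresh (l := M) (k := Prod.fst)
      (v := fun p => p.2.map (fun s => dl.getD s [])) (d := PySem.Dict.empty)
      (by intro a _; exact PySem.Dict.contains_empty _) hnd
    simpa using this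
  simp only [hdata]
  rw [outer_eq dl M PySem.Dict.empty (by intro q _; exact PySem.Dict.contains_empty _) hnd]
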